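-- pv_equiv track=rewrite | github.com/benthamite/stafforini.com | scripts/create-bib-entries.py | format_bib_entry
-- ===== SOURCE A (Python) =====
-- FIELD_ORDER = [
--     "crossref",
--     "author", "editor", "translator",
--     "title", "shorttitle", "subtitle",
--     "booktitle", "journaltitle", "maintitle",
--     "date", "origdate",
--     "edition", "volume", "number", "part",
--     "pages", "pagetotal",
--     "publisher", "location",
--     "isbn", "issn", "doi",
--     "url", "urldate",
--     "howpublished", "type", "entrysubtype",
--     "series", "language", "langid",
--     "note",
--     "abstract", "keywords",
--     "file", "timestamp",
-- ]
--
-- def format_bib_entry(entry_type, cite_key, fields):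
--     """Format a BibLaTeX entry with tab indentation and ordered fields."""
--     lines = [f"@{entry_type}{{{cite_key},"]
--
--     added = set()
--     for key in FIELD_ORDER:
--         if key in fields and fields[key]:
--             lines.append(f"\t{key} = {{{fields[key]}}},")
--             added.add(key)
--
--     for key, value in fields.items():
--         if key not in added and value:
--             lines.append(f"\t{key} = {{{value}}},")
--
--     lines.append("}")
--     return "\n".join(lines)
-- ===== SOURCE B (Python) =====
-- FIELD_ORDER = [
--     "crossref",
--     "author", "editor", "translator",
--     "title", "shorttitle", "subtitle",
--     "booktitle", "journaltitle", "maintitle",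
--     "date", "origdate",
--     "edition", "volume", "number", "part",
--     "pages", "pagetotal",
--     "publisher", "location",
--     "isbn", "issn", "doi",
--     "url", "urldate",
--     "howpublished", "type", "entrysubtype",
--     "series", "language", "langid",
--     "note",
--     "abstract", "keywords",
--     "file", "timestamp",
-- ]
--
-- def format_bib_entry(entry_type, cite_key, fields):
--     """Format a BibLaTeX entry: one stable sort by field rank instead of two scans."""
--     order_index = {name: i for i, name in enumerate(FIELD_ORDER)}
--     lines = [f"@{entry_type}{{{cite_key},"]
--     for key, value in sorted(fields.items(), key=lambda kv: order_index.get(kv[0], len(FIELD_ORDER))):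
--         if value:
--             lines.append(f"\t{key} = {{{value}}},")
--     lines.append("}")
--     return "\n".join(lines)
-- ===== Notes on version B (the rewrite author's own statement) =====
-- stated objective: simpler
-- what changed: Replaces A's two scans (a FIELD_ORDER pass with dict lookups and an 'added' set, then a second pass over the remaining dict items) by one stable sort of the items keyed by a precomputed rank index followed by a single emit loop.
import Mathlib
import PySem

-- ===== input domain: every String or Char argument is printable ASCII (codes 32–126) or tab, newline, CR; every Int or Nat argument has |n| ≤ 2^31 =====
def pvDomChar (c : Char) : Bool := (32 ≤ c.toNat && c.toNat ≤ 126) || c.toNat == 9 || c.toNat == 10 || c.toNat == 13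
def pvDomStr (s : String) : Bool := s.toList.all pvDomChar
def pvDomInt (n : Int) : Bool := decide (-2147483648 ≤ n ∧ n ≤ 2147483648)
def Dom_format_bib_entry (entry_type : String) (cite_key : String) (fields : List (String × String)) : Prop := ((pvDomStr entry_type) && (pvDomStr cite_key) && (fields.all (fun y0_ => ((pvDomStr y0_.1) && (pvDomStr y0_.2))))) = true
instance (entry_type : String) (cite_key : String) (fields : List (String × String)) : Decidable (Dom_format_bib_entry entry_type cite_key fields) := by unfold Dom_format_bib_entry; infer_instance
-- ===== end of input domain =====

-- B replaces A's two scans (FIELD_ORDER pass + leftover-items pass with an 'added' set) by one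
-- stable sort of the items under a precomputed rank index; objective: simpler, same exact output.


-- ===== PORT A =====
def pvFieldOrder : List String :=
  ["crossref",
   "author", "editor", "translator",
   "title", "shorttitle", "subtitle",
   "booktitle", "journaltitle", "maintitle",
   "date", "origdate",
   "edition", "volume", "number", "part",
   "pages", "pagetotal",
   "publisher", "location",
   "isbn", "issn", "doi",
   "url", "urldate",
   "howpublished", "type", "entrysubtype",
   "series", "language", "langid",
   "note",
   "abstract", "keywords",
   "file", "timestamp"]

def format_bib_entry (entry_type : String) (cite_key : String) (fields : List (String × String)) : String :=
  let d : PySem.Dict String String := PySem.Dict.mk fields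
  let st : List String × PySem.Set String :=
    pvFieldOrder.foldl
      (fun st key =>
        match PySem.Dict.get? d key with
        | some v => if v != "" then (st.1 ++ ["\t" ++ key ++ " = {" ++ v ++ "},"], PySem.Set.add st.2 key) else st
        | none => st)
      (["@" ++ entry_type ++ "{" ++ cite_key ++ ","], PySem.Set.empty)
  let lines : List String :=
    (PySem.Dict.items d).foldl
      (fun acc kv =>
        if !(PySem.Set.contains st.2 kv.1) && kv.2 != "" then acc ++ ["\t" ++ kv.1 ++ " = {" ++ kv.2 ++ "},"] else acc)
      st.1
  PySem.Str.join "\n" (lines ++ ["}"])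

-- ===== PORT B =====
def format_bib_entry_alt (entry_type : String) (cite_key : String) (fields : List (String × String)) : String :=
  let order_index : PySem.Dict String Int :=
    (PySem.List.enumerate pvFieldOrder).foldl (fun d p => PySem.Dict.insert d p.2 p.1) PySem.Dict.empty
  let items : List (String × String) :=
    PySem.List.sorted (PySem.Dict.items (PySem.Dict.mk fields))
      (fun kv => PySem.Dict.getD order_index kv.1 (PySem.List.len pvFieldOrder)) false
  let lines : List String :=
    items.foldl
      (fun acc kv => if kv.2 != "" then acc ++ ["\t" ++ kv.1 ++ " = {" ++ kv.2 ++ "},"] else acc)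
      ["@" ++ entry_type ++ "{" ++ cite_key ++ ","]
  PySem.Str.join "\n" (lines ++ ["}"])

-- ===== PRECONDITION & SPEC =====
-- Pre_ excludes association lists with duplicate keys: the Python argument is a dict, which cannot
-- contain them, so any behaviour of the ports on such lists is an artefact of the list encoding.
def Pre_format_bib_entry (entry_type : String) (cite_key : String) (fields : List (String × String)) : Prop :=
  (fields.map Prod.fst).Nodup
instance (entry_type : String) (cite_key : String) (fields : List (String × String)) : Decidable (Pre_format_bib_entry entry_type cite_key fields) := by unfold Pre_format_bib_entry; infer_instance

def pvWitness_format_bib_entry : String × String × (List (String × String)) :=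
  ("book", "kant1781", [("zzz", "x"), ("title", "Critique of Pure Reason"), ("subtitle", "")])

def Spec_format_bib_entry (entry_type : String) (cite_key : String) (fields : List (String × String)) (out : String) : Prop := out = format_bib_entry_alt entry_type cite_key fields
instance (entry_type : String) (cite_key : String) (fields : List (String × String)) (out : String) : Decidable (Spec_format_bib_entry entry_type cite_key fields out) := by unfold Spec_format_bib_entry; infer_instance

-- ===== CLAIM (what is proved, stated in full; the proofs are below) =====
def Claim_equal_format_bib_entry : Prop := ∀ (entry_type : String) (cite_key : String) (fields : List (String × String)), Dom_format_bib_entry entry_type cite_key fields → Pre_format_bib_entry entry_type cite_key fields → Spec_format_bib_entry entry_type cite_key fields (format_bib_entry entry_type cite_key fields)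

-- ===== LEMMAS AND PROOFS =====

-- the emitted line for one field, and A's per-FIELD_ORDER-key selection
def pvEmit (kv : String × String) : String := "\t" ++ kv.1 ++ " = {" ++ kv.2 ++ "},"

def pvSel (d : PySem.Dict String String) (k : String) : Option String :=
  match PySem.Dict.get? d k with
  | some v => if v != "" then some (pvEmit (k, v)) else none
  | none => none

def pvAddKey (d : PySem.Dict String String) (s : PySem.Set String) (k : String) : PySem.Set String :=
  match PySem.Dict.get? d k with
  | some v => if v != "" then PySem.Set.add s k else s
  | none => s

def pvKeyL (L : List String) (kv : String × String) : Int := (L.idxOf kv.1 : Int)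

-- A's first loop: lines accumulate a filterMap over FIELD_ORDER; 'added' is a fold of pvAddKey
theorem pv_loop1 (d : PySem.Dict String String) :
    ∀ (l : List String) (lines : List String) (added : PySem.Set String),
    l.foldl
      (fun st key =>
        match PySem.Dict.get? d key with
        | some v => if v != "" then (st.1 ++ ["\t" ++ key ++ " = {" ++ v ++ "},"], PySem.Set.add st.2 key) else st
        | none => st)
      (lines, added)
    = (lines ++ l.filterMap (pvSel d), l.foldl (pvAddKey d) added) := by
  intro l
  induction l with
  | nil => intro lines added; simp
  | cons a l ih =>
    intro lines added
    rw [List.foldl_cons, List.foldl_cons, List.filterMap_cons]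
    cases h : PySem.Dict.get? d a with
    | none =>
      have h1 : pvSel d a = none := by simp [pvSel, h]
      have h2 : pvAddKey d added a = added := by simp [pvAddKey, h]
      simp only [h1, h2]
      exact ih lines added
    | some v =>
      cases hv : (v != "") with
      | false =>
        have h1 : pvSel d a = none := by simp [pvSel, h, hv]
        have h2 : pvAddKey d added a = added := by simp [pvAddKey, h, hv]
        simp only [hv, h1, h2, Bool.false_eq_true, if_false]
        exact ih lines added
      | true =>
        have h1 : pvSel d a = some (pvEmit (a, v)) := by simp [pvSel, h, hv]
        have h2 : pvAddKey d added a = PySem.Set.add added a := by simp [pvAddKey, h, hv]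
        simp only [hv, h1, h2, if_true]
        rw [ih]
        simp [pvEmit]

theorem pv_mem_loop1_added (d : PySem.Dict String String) :
    ∀ (l : List String) (added : PySem.Set String) (k : String),
    (k ∈ l.foldl (pvAddKey d) added) ↔ k ∈ added ∨ (k ∈ l ∧ PySem.Dict.getD d k "" ≠ "") := by
  intro l
  induction l with
  | nil => intro added k; simp
  | cons a l ih =>
    intro added k
    rw [List.foldl_cons, ih]
    cases h : PySem.Dict.get? d a with
    | none =>
      have h2 : pvAddKey d added a = added := by simp [pvAddKey, h]
      rw [h2]
      by_cases hk : k = a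
      · subst hk
        simp [PySem.Dict.getD_eq_get?_getD, h]
      · simp [hk]
    | some v =>
      cases hv : (v != "") with
      | false =>
        have h2 : pvAddKey d added a = added := by simp [pvAddKey, h, hv]
        rw [h2]
        have hv' : v = "" := by simpa [bne] using hv
        by_cases hk : k = a
        · subst hk
          simp [PySem.Dict.getD_eq_get?_getD, h, hv']
        · simp [hk]
      | true =>
        have h2 : pvAddKey d added a = PySem.Set.add added a := by simp [pvAddKey, h, hv]
        rw [h2, PySem.Set.mem_add]
        by_cases hk : k = a
        · subst hk
          have hg : PySem.Dict.getD d k "" = v := by simp [PySem.Dict.getD_eq_get?_getD, h]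
          have hv'' : v ≠ "" := by simpa [bne] using hv
          simp [hg, hv'']
        · simp [hk]

theorem pv_insertBy_append {α : Type} (bef : α → α → Bool) (x : α) (ys zs : List α)
    (h : ∀ y ∈ ys, bef x y = false) :
    PySem.List.insertBy bef x (ys ++ zs) = ys ++ PySem.List.insertBy bef x zs := by
  induction ys with
  | nil => simp
  | cons y ys ih =>
    have hy : bef x y = false := h y (by simp)
    simp only [List.cons_append, PySem.List.insertBy, hy, Bool.false_eq_true, if_false]
    rw [ih (fun z hz => h z (by simp [hz]))]


theorem pv_insertBy_all_true {α : Type} (bef : α → α → Bool) (x : α) (zs : List α)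
    (h : ∀ y ∈ zs, bef x y = true) :
    PySem.List.insertBy bef x zs = x :: zs := by
  cases zs with
  | nil => rfl
  | cons z zs => simp [PySem.List.insertBy, h z (by simp)]


theorem pv_sorted_snoc {α κ : Type} [LinearOrder κ] (xs : List α) (x : α) (key : α → κ) :
    PySem.List.sorted (xs ++ [x]) key false
      = PySem.List.insertBy (fun a b => decide (key a < key b)) x (PySem.List.sorted xs key false) := by
  rw [PySem.List.sorted_eq_foldl_insertBy, PySem.List.sorted_eq_foldl_insertBy, List.foldl_append]
  rfl


-- stable sort by FIELD_ORDER rank = buckets in FIELD_ORDER order, then the unranked items in order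
theorem pv_sorted_idx (L : List String) (hL : L.Nodup) (xs : List (String × String)) :
    PySem.List.sorted xs (pvKeyL L) false
      = L.flatMap (fun k => xs.filter (fun kv => kv.1 == k))
        ++ xs.filter (fun kv => !(decide (kv.1 ∈ L))) := by
  induction xs using List.reverseRecOn with
  | nil => simp [PySem.List.sorted_eq_foldl_insertBy]
  | append_singleton xs x ih =>
    rw [pv_sorted_snoc, ih]
    by_cases hx : x.1 ∈ L
    · obtain ⟨L₁, L₂, hsplit⟩ := List.append_of_mem hx
      subst hsplit
      rw [List.nodup_append] at hL
      obtain ⟨hn1, hn2, hdisj⟩ := hL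
      rw [List.nodup_cons] at hn2
      obtain ⟨hx2, hn2'⟩ := hn2
      have hx1 : x.1 ∉ L₁ := fun hm => hdisj x.1 hm x.1 (by simp) rfl
      have hxr : List.idxOf x.1 (L₁ ++ x.1 :: L₂) = L₁.length := by
        rw [List.idxOf_append_of_notMem hx1, List.idxOf_cons_self]
        omega
      have hkey1 : ∀ y ∈ L₁.flatMap (fun k => xs.filter (fun kv : String × String => kv.1 == k))
            ++ xs.filter (fun kv : String × String => kv.1 == x.1),
          (fun a b => decide (pvKeyL (L₁ ++ x.1 :: L₂) a < pvKeyL (L₁ ++ x.1 :: L₂) b)) x y = false := by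
        intro y hy
        have hyk : List.idxOf y.1 (L₁ ++ x.1 :: L₂) ≤ L₁.length := by
          rcases List.mem_append.mp hy with hy | hy
          · obtain ⟨k, hkL, hyf⟩ := List.mem_flatMap.mp hy
            have hyeq : y.1 = k := by simpa using (List.mem_filter.mp hyf).2
            rw [hyeq, List.idxOf_append_of_mem hkL]
            exact le_of_lt (List.idxOf_lt_length_iff.mpr hkL)
          · have hyeq : y.1 = x.1 := by simpa using (List.mem_filter.mp hy).2
            rw [hyeq, hxr]
        simp only [pvKeyL, hxr, decide_eq_false_iff_not, not_lt]
        exact_mod_cast hyk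
      have hkey2 : ∀ y ∈ L₂.flatMap (fun k => xs.filter (fun kv : String × String => kv.1 == k))
            ++ xs.filter (fun kv : String × String => !(decide (kv.1 ∈ L₁ ++ x.1 :: L₂))),
          (fun a b => decide (pvKeyL (L₁ ++ x.1 :: L₂) a < pvKeyL (L₁ ++ x.1 :: L₂) b)) x y = true := by
        intro y hy
        have hyk : L₁.length < List.idxOf y.1 (L₁ ++ x.1 :: L₂) := by
          rcases List.mem_append.mp hy with hy | hy
          · obtain ⟨k, hkL, hyf⟩ := List.mem_flatMap.mp hy
            have hyeq : y.1 = k := by simpa using (List.mem_filter.mp hyf).2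
            have hkn1 : k ∉ L₁ := fun hm => hdisj k hm k (by simp [hkL]) rfl
            have hkx : x.1 ≠ k := fun he => hx2 (he ▸ hkL)
            rw [hyeq, List.idxOf_append_of_notMem hkn1, List.idxOf_cons_ne _ hkx]
            omega
          · have hyn : y.1 ∉ L₁ ++ x.1 :: L₂ := by simpa using (List.mem_filter.mp hy).2
            rw [List.idxOf_of_notMem hyn]
            simp
        simp only [pvKeyL, hxr, decide_eq_true_eq]
        exact_mod_cast hyk
      have lhs :
          PySem.List.insertBy (fun a b => decide (pvKeyL (L₁ ++ x.1 :: L₂) a < pvKeyL (L₁ ++ x.1 :: L₂) b)) x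
              ((L₁ ++ x.1 :: L₂).flatMap (fun k => xs.filter (fun kv : String × String => kv.1 == k))
                ++ xs.filter (fun kv : String × String => !(decide (kv.1 ∈ L₁ ++ x.1 :: L₂))))
            = L₁.flatMap (fun k => xs.filter (fun kv : String × String => kv.1 == k))
              ++ (xs.filter (fun kv : String × String => kv.1 == x.1)
                ++ (x :: (L₂.flatMap (fun k => xs.filter (fun kv : String × String => kv.1 == k))
                  ++ xs.filter (fun kv : String × String => !(decide (kv.1 ∈ L₁ ++ x.1 :: L₂)))))) := by
        rw [List.flatMap_append, List.flatMap_cons]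
        rw [show (L₁.flatMap (fun k => xs.filter (fun kv : String × String => kv.1 == k))
              ++ (xs.filter (fun kv : String × String => kv.1 == x.1)
                ++ L₂.flatMap (fun k => xs.filter (fun kv : String × String => kv.1 == k))))
              ++ xs.filter (fun kv : String × String => !(decide (kv.1 ∈ L₁ ++ x.1 :: L₂)))
            = (L₁.flatMap (fun k => xs.filter (fun kv : String × String => kv.1 == k))
              ++ xs.filter (fun kv : String × String => kv.1 == x.1))
              ++ (L₂.flatMap (fun k => xs.filter (fun kv : String × String => kv.1 == k))
                ++ xs.filter (fun kv : String × String => !(decide (kv.1 ∈ L₁ ++ x.1 :: L₂))))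
            from by simp [List.append_assoc]]
        rw [pv_insertBy_append _ _ _ _ hkey1, pv_insertBy_all_true _ _ _ hkey2]
        simp [List.append_assoc]
      rw [lhs]
      have hmid : (xs ++ [x]).filter (fun kv : String × String => kv.1 == x.1)
          = xs.filter (fun kv : String × String => kv.1 == x.1) ++ [x] := by
        rw [List.filter_append]; simp
      have hrest : (xs ++ [x]).filter (fun kv : String × String => !(decide (kv.1 ∈ L₁ ++ x.1 :: L₂)))
          = xs.filter (fun kv : String × String => !(decide (kv.1 ∈ L₁ ++ x.1 :: L₂))) := by
        rw [List.filter_append]; simp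
      have h1 : L₁.flatMap (fun k => (xs ++ [x]).filter (fun kv : String × String => kv.1 == k))
          = L₁.flatMap (fun k => xs.filter (fun kv : String × String => kv.1 == k)) := by
        apply List.flatMap_congr; intro k hk
        rw [List.filter_append]
        have : ¬(x.1 == k) = true := by simp; exact fun he => hx1 (he ▸ hk)
        simp [this]
      have h2 : L₂.flatMap (fun k => (xs ++ [x]).filter (fun kv : String × String => kv.1 == k))
          = L₂.flatMap (fun k => xs.filter (fun kv : String × String => kv.1 == k)) := by
        apply List.flatMap_congr; intro k hk
        rw [List.filter_append]
        have : ¬(x.1 == k) = true := by simp; exact fun he => hx2 (he ▸ hk)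
        simp [this]
      rw [List.flatMap_append, List.flatMap_cons, hmid, hrest, h1, h2]
      simp [List.append_assoc]
    · have hfalse : ∀ y ∈ L.flatMap (fun k => xs.filter (fun kv : String × String => kv.1 == k))
            ++ xs.filter (fun kv : String × String => !(decide (kv.1 ∈ L))),
          (fun a b => decide (pvKeyL L a < pvKeyL L b)) x y = false := by
        intro y _
        have hxi : List.idxOf x.1 L = L.length := List.idxOf_of_notMem hx
        have hyk : List.idxOf y.1 L ≤ L.length := by
          by_cases hm : y.1 ∈ L
          · exact le_of_lt (List.idxOf_lt_length_iff.mpr hm)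
          · exact le_of_eq (List.idxOf_of_notMem hm)
        simp only [pvKeyL, hxi, decide_eq_false_iff_not, not_lt]
        exact_mod_cast hyk
      rw [PySem.List.insertBy_of_forall_not_before _ _ _ hfalse]
      have h1 : L.flatMap (fun k => (xs ++ [x]).filter (fun kv : String × String => kv.1 == k))
          = L.flatMap (fun k => xs.filter (fun kv : String × String => kv.1 == k)) := by
        apply List.flatMap_congr; intro k hk
        rw [List.filter_append]
        have : ¬(x.1 == k) = true := by simp; exact fun he => hx (he ▸ hk)
        simp [this]
      have h2 : (xs ++ [x]).filter (fun kv : String × String => !(decide (kv.1 ∈ L)))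
          = xs.filter (fun kv : String × String => !(decide (kv.1 ∈ L))) ++ [x] := by
        rw [List.filter_append]; simp [hx]
      rw [h1, h2]
      simp [List.append_assoc]

theorem pv_enum_getD (k : String) (dflt : Int) :
    ∀ (l : List String), l.Nodup → ∀ (s : Int) (d : PySem.Dict String Int),
    PySem.Dict.getD ((PySem.List.enumerate l s).foldl (fun d p => PySem.Dict.insert d p.2 p.1) d) k dflt
      = if k ∈ l then s + (l.idxOf k : Int) else PySem.Dict.getD d k dflt := by
  intro l
  induction l with
  | nil => intro _ s d; simp [PySem.List.enumerate]
  | cons a l ih =>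
    intro hnd s d
    have hal : a ∉ l := (List.nodup_cons.mp hnd).1
    have hl : l.Nodup := (List.nodup_cons.mp hnd).2
    rw [PySem.List.enumerate_cons, List.foldl_cons, ih hl]
    by_cases hkl : k ∈ l
    · have hka : k ≠ a := fun h => hal (h ▸ hkl)
      have : a ≠ k := fun h => hka h.symm
      simp [hkl, List.idxOf_cons_ne _ this, Nat.succ_eq_add_one]
      ring
    · by_cases hka : k = a
      · subst hka
        simp [hkl, List.idxOf_cons_self]
      · have : a ≠ k := fun h => hka h.symm
        simp [hkl, hka, PySem.Dict.getD_insert]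


theorem pv_nodup_fieldOrder : pvFieldOrder.Nodup := by decide

theorem pv_key_eq (k : String) :
    PySem.Dict.getD ((PySem.List.enumerate pvFieldOrder).foldl (fun d p => PySem.Dict.insert d p.2 p.1) PySem.Dict.empty)
        k (PySem.List.len pvFieldOrder)
      = (pvFieldOrder.idxOf k : Int) := by
  rw [pv_enum_getD k _ pvFieldOrder pv_nodup_fieldOrder 0 PySem.Dict.empty]
  by_cases hk : k ∈ pvFieldOrder
  · simp [hk]
  · simp [hk, PySem.Dict.getD_empty, PySem.List.len_eq]


theorem pv_filter_key_nil (fields : List (String × String)) (k : String)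
    (h : k ∉ fields.map Prod.fst) :
    fields.filter (fun kv => kv.1 == k) = [] := by
  induction fields with
  | nil => rfl
  | cons p rest ih =>
    simp only [List.map_cons, List.mem_cons, not_or] at h
    have : ¬(p.1 == k) = true := by simp; exact fun hh => h.1 hh.symm
    simp only [List.filter_cons, this]
    exact ih h.2


theorem pv_filter_key :
    ∀ (fields : List (String × String)), (fields.map Prod.fst).Nodup → ∀ (k : String),
    fields.filter (fun kv => kv.1 == k)
      = match PySem.Dict.get? (PySem.Dict.mk fields) k with
        | some v => [(k, v)]
        | none => [] := by
  intro fields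
  induction fields with
  | nil => intro _ k; rfl
  | cons p rest ih =>
    obtain ⟨a, b⟩ := p
    intro hnd k
    have hrest : (rest.map Prod.fst).Nodup := (List.nodup_cons.mp (by simpa using hnd)).2
    have hniq : a ∉ rest.map Prod.fst := (List.nodup_cons.mp (by simpa using hnd)).1
    rw [PySem.Dict.get?_mk_cons]
    by_cases hak : a = k
    · subst hak
      simp only [List.filter_cons, show ((a, b).1 == a) = true by simp, if_true]
      rw [pv_filter_key_nil rest a hniq]
    · have : ¬(a == k) = true := by simpa using hak
      simp only [List.filter_cons, this]
      rw [ih hrest k]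
      simp


theorem pv_main (entry_type cite_key : String) (fields : List (String × String))
    (h : (fields.map Prod.fst).Nodup) :
    format_bib_entry entry_type cite_key fields = format_bib_entry_alt entry_type cite_key fields := by
  have hitems : PySem.Dict.items (PySem.Dict.mk fields) = fields := rfl
  have hkeysnd : (PySem.Dict.mk fields).keys.Nodup := by simpa [PySem.Dict.keys_mk] using h
  -- A side
  have hA : format_bib_entry entry_type cite_key fields
      = PySem.Str.join "\n"
          ((["@" ++ entry_type ++ "{" ++ cite_key ++ ","]
            ++ (pvFieldOrder.filterMap (pvSel (PySem.Dict.mk fields))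
              ++ (fields.filter (fun kv =>
                    !(PySem.Set.contains (pvFieldOrder.foldl (pvAddKey (PySem.Dict.mk fields)) PySem.Set.empty) kv.1)
                      && kv.2 != "")).map pvEmit))
          ++ ["}"]) := by
    simp only [format_bib_entry]
    rw [pv_loop1]
    have hp1 : ((["@" ++ entry_type ++ "{" ++ cite_key ++ ","] ++ pvFieldOrder.filterMap (pvSel (PySem.Dict.mk fields)),
        pvFieldOrder.foldl (pvAddKey (PySem.Dict.mk fields)) PySem.Set.empty) :
          List String × PySem.Set String).1
        = ["@" ++ entry_type ++ "{" ++ cite_key ++ ","] ++ pvFieldOrder.filterMap (pvSel (PySem.Dict.mk fields)) := rfl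
    have hp2 : ((["@" ++ entry_type ++ "{" ++ cite_key ++ ","] ++ pvFieldOrder.filterMap (pvSel (PySem.Dict.mk fields)),
        pvFieldOrder.foldl (pvAddKey (PySem.Dict.mk fields)) PySem.Set.empty) :
          List String × PySem.Set String).2
        = pvFieldOrder.foldl (pvAddKey (PySem.Dict.mk fields)) PySem.Set.empty := rfl
    rw [hp1, hp2]
    rw [PySem.List.foldl_append_if
      (fun kv : String × String =>
        !(PySem.Set.contains (pvFieldOrder.foldl (pvAddKey (PySem.Dict.mk fields)) PySem.Set.empty) kv.1)
          && kv.2 != "")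
      (fun kv : String × String => "\t" ++ kv.1 ++ " = {" ++ kv.2 ++ "},") fields]
    simp [List.append_assoc]
    rfl
  -- B side
  have hB : format_bib_entry_alt entry_type cite_key fields
      = PySem.Str.join "\n"
          ((["@" ++ entry_type ++ "{" ++ cite_key ++ ","]
            ++ ((PySem.List.sorted fields (pvKeyL pvFieldOrder) false).filter
                  (fun kv : String × String => kv.2 != "")).map pvEmit)
          ++ ["}"]) := by
    simp only [format_bib_entry_alt]
    have hkey : (fun kv : String × String =>
        PySem.Dict.getD
          ((PySem.List.enumerate pvFieldOrder).foldl (fun d p => PySem.Dict.insert d p.2 p.1) PySem.Dict.empty)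
          kv.1 (PySem.List.len pvFieldOrder)) = pvKeyL pvFieldOrder :=
      funext (fun kv => pv_key_eq kv.1)
    rw [hkey]
    rw [PySem.List.foldl_append_if
      (fun kv : String × String => kv.2 != "")
      (fun kv : String × String => "\t" ++ kv.1 ++ " = {" ++ kv.2 ++ "},")
      (PySem.List.sorted fields (pvKeyL pvFieldOrder) false)]
    simp
    rfl
  -- the sorted-and-filtered middle equals A's two parts
  have hZ : ((PySem.List.sorted fields (pvKeyL pvFieldOrder) false).filter
        (fun kv : String × String => kv.2 != "")).map pvEmit
      = pvFieldOrder.filterMap (pvSel (PySem.Dict.mk fields))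
        ++ (fields.filter (fun kv =>
              !(PySem.Set.contains (pvFieldOrder.foldl (pvAddKey (PySem.Dict.mk fields)) PySem.Set.empty) kv.1)
                && kv.2 != "")).map pvEmit := by
    rw [pv_sorted_idx pvFieldOrder pv_nodup_fieldOrder fields]
    rw [List.filter_append, List.map_append, List.filter_flatMap, List.map_flatMap]
    congr 1
    · rw [List.filterMap_eq_flatMap_toList]
      apply List.flatMap_congr
      intro k _
      rw [pv_filter_key fields h k]
      cases hget : PySem.Dict.get? (PySem.Dict.mk fields) k with
      | none => simp [pvSel, hget]
      | some v =>
        cases hv : (v != "") with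
        | false => simp [pvSel, hget, hv]
        | true => simp [pvSel, hget, hv, pvEmit]
    · congr 1
      rw [List.filter_filter]
      apply List.filter_congr
      intro kv hkv
      have hget : PySem.Dict.get? (PySem.Dict.mk fields) kv.1 = some kv.2 :=
        PySem.Dict.get?_of_mem_items _ (by simpa [hitems] using hkv) hkeysnd
      have hgd : PySem.Dict.getD (PySem.Dict.mk fields) kv.1 "" = kv.2 := by
        simp [PySem.Dict.getD_eq_get?_getD, hget]
      have hmem : kv.1 ∈ pvFieldOrder.foldl (pvAddKey (PySem.Dict.mk fields)) PySem.Set.empty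
          ↔ kv.1 ∈ pvFieldOrder ∧ PySem.Dict.getD (PySem.Dict.mk fields) kv.1 "" ≠ "" := by
        rw [pv_mem_loop1_added]
        simp [PySem.Set.empty]
      cases hv : (kv.2 != "") with
      | false => simp
      | true =>
        have hv' : kv.2 ≠ "" := by simpa [bne] using hv
        have hcon : PySem.Set.contains (pvFieldOrder.foldl (pvAddKey (PySem.Dict.mk fields)) PySem.Set.empty) kv.1
            = decide (kv.1 ∈ pvFieldOrder) := by
          rw [Bool.eq_iff_iff, PySem.Set.contains_iff, hmem]
          simp [hgd, hv']
        simp [pv_mem_loop1_added, hgd, hv']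
  rw [hA, hB, hZ]

-- ===== VERDICT (by name: the statement is the Claim_ definition above) =====
theorem format_bib_entry_spec : Claim_equal_format_bib_entry := by
  intro entry_type cite_key fields _ hpre
  unfold Spec_format_bib_entry
  exact pv_main entry_type cite_key fields hpre
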